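-- pv_equiv track=rewrite | github.com/LaurentPRAT-DB/databricks-airport-digital-twin | tests/test_go_around_video.py | _phase_sequence
-- ===== SOURCE A (Python) =====
-- def _phase_sequence(trace):
--     """Return ordered list of distinct phases a flight goes through."""
--     if not trace:
--         return []
--     phases = [trace[0]["phase"]]
--     for p in trace[1:]:
--         if p["phase"] != phases[-1]:
--             phases.append(p["phase"])
--     return phases
-- ===== SOURCE B (Python) =====
-- def _phase_sequence(trace):
--     """Return ordered list of distinct phases a flight goes through."""
--     def strip(ps):
--         # emit the head of the run, skip the whole run, recurse on the remainder
--         if not ps: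
--             return []
--         head = ps[0]
--         i = 1
--         while i < len(ps) and ps[i] == head:
--             i += 1
--         return [head] + strip(ps[i:])
--     return strip([p["phase"] for p in trace])
-- ===== Notes on version B (the rewrite author's own statement) =====
-- stated objective: alternative
-- what changed: B extracts the phase list once and then recursively strips whole runs of equal consecutive phases (emit run head, drop the run, recurse on the remainder), instead of A's single accumulator loop comparing each entry against phases[-1].
import Mathlib
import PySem

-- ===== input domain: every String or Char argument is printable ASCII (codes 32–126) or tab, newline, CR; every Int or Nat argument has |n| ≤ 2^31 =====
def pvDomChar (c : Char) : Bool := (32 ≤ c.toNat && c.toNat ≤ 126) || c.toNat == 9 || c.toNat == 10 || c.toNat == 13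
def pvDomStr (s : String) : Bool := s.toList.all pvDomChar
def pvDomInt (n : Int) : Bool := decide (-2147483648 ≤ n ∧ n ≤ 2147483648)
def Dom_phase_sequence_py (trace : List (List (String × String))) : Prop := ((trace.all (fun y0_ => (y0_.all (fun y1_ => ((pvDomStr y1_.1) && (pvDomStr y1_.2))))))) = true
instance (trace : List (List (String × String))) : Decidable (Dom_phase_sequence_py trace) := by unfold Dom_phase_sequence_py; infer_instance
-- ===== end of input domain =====

-- B extracts the phase list once and recursively strips whole runs of equal consecutive phases; same result, different algorithm shape.
-- Shared dict access p["phase"] (first match in the association list; "" only outside Pre_).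
def pvPhase (e : List (String × String)) : String := (List.lookup "phase" e).getD ""

-- ===== PORT A =====
def phase_sequence_py (trace : List (List (String × String))) : List String :=
  match trace with
  | [] => []
  | t0 :: rest =>
      rest.foldl (fun phases p =>
        if pvPhase p ≠ phases.getLastD "" then phases ++ [pvPhase p] else phases)
        [pvPhase t0]

-- ===== PORT B =====
-- strip: emit the head of the run, drop the whole run (dropWhile = B's index-advancing while loop), recurse.
def pvStrip : List String → List String
  | [] => []
  | head :: tl => head :: pvStrip (tl.dropWhile (· == head))
termination_by l => l.length
decreasing_by
  simpa using Nat.lt_succ_of_le (List.length_dropWhile_le (· == head) tl)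

def phase_sequence_py_alt (trace : List (List (String × String))) : List String :=
  pvStrip (trace.map pvPhase)

-- ===== PRECONDITION & SPEC =====
-- Pre_ excludes exactly the traces containing an entry without the key "phase": there Python's p["phase"] raises KeyError.
def Pre_phase_sequence_py (trace : List (List (String × String))) : Prop :=
  (trace.all (fun e => e.any (fun kv => kv.1 == "phase"))) = true
instance (trace : List (List (String × String))) : Decidable (Pre_phase_sequence_py trace) := by unfold Pre_phase_sequence_py; infer_instance

def pvWitness_phase_sequence_py : (List (List (String × String))) :=
  [[("phase", "taxi")], [("phase", "climb")], [("phase", "climb")]]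

def Spec_phase_sequence_py (trace : List (List (String × String))) (out : List String) : Prop := out = phase_sequence_py_alt trace
instance (trace : List (List (String × String))) (out : List String) : Decidable (Spec_phase_sequence_py trace out) := by unfold Spec_phase_sequence_py; infer_instance

-- ===== CLAIM (what is proved, stated in full; the proofs are below) =====
def Claim_equal_phase_sequence_py : Prop := ∀ (trace : List (List (String × String))), Dom_phase_sequence_py trace → Pre_phase_sequence_py trace → Spec_phase_sequence_py trace (phase_sequence_py trace)

-- ===== LEMMAS AND PROOFS =====

-- A's loop from a nonempty accumulator ending in `prev` appends exactly what
-- the run-stripping recursion produces after discarding the leading run of `prev`.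
theorem pv_fold_strip (ps : List String) : ∀ (acc : List String) (prev : String),
    acc.getLast? = some prev →
    ps.foldl (fun phases x => if x ≠ phases.getLastD "" then phases ++ [x] else phases) acc
      = acc ++ pvStrip (ps.dropWhile (· == prev)) := by
  induction ps with
  | nil => intro acc prev _; simp [pvStrip]
  | cons x xs ih =>
      intro acc prev hlast
      have hgd : acc.getLastD "" = prev := by
        rw [List.getLastD_eq_getLast?, hlast]; rfl
      simp only [List.foldl_cons, hgd]
      by_cases h : x = prev
      · subst h
        rw [if_neg (by simp), ih acc x hlast]
        simp [List.dropWhile]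
      · rw [if_pos h, ih (acc ++ [x]) x (by simp)]
        have h' : (x == prev) = false := by simpa using h
        simp [List.dropWhile, h', pvStrip]
-- A's loop over dict entries equals the same loop over their extracted phases.
theorem pv_foldl_pvPhase (l : List (List (String × String))) (acc : List String) :
    l.foldl (fun phases p => if pvPhase p ≠ phases.getLastD "" then phases ++ [pvPhase p] else phases) acc
      = (l.map pvPhase).foldl (fun phases x => if x ≠ phases.getLastD "" then phases ++ [x] else phases) acc := by
  induction l generalizing acc with
  | nil => simp [pvStrip]
  | cons p rest ih => simp only [List.foldl_cons, List.map_cons]; exact ih _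

-- ===== VERDICT (by name: the statement is the Claim_ definition above) =====
theorem phase_sequence_py_spec : Claim_equal_phase_sequence_py := by
  intro trace _ _
  unfold Spec_phase_sequence_py phase_sequence_py phase_sequence_py_alt
  cases trace with
  | nil => simp [pvStrip]
  | cons t0 rest =>
      simp only [List.map_cons]
      rw [pv_foldl_pvPhase, pv_fold_strip (rest.map pvPhase) [pvPhase t0] (pvPhase t0) rfl]
      rw [pvStrip]
      rfl
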